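-- pv_equiv track=rewrite | github.com/Gatimoro/Leetcode-Solutions | Medium Problems/XorTriplets2.py | uniqueXorTriplets
-- ===== SOURCE A (Python) =====
-- from typing import List
--
-- def uniqueXorTriplets(nums: List[int]) -> int:
--     s = set(nums)
--     seen = set()
--     ans = set()
--     for a in s:
--         for b in s:
--             seen.add(a^b)
--
--     for v in seen:
--         for w in s:
--             ans.add(v^w)
--     return len(ans)
-- ===== SOURCE B (Python) =====
-- from typing import List
--
-- def uniqueXorTriplets(nums: List[int]) -> int:
--     # Normalise by the minimum value a0: every triple XOR a^b^c equals
--     # a0 ^ (XOR of a subset of size <= 3 of the nonzero deltas x^a0), and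
--     # xoring a fixed a0 is a bijection, so the answer is the number of such
--     # subset XORs.  A layered one-pass DP maintains the XORs of exactly
--     # 1-, 2- and 3-element subsets of the deltas seen so far.
--     s = set(nums)
--     if not s:
--         return 0
--     a0 = min(s)
--     deltas = sorted({x ^ a0 for x in s} - {0})
--     s1, s2, s3 = set(), set(), set()
--     for x in deltas:
--         s3 |= {y ^ x for y in s2}
--         s2 |= {y ^ x for y in s1}
--         s1.add(x)
--     return len({0} | s1 | s2 | s3)
-- ===== Notes on version B (the rewrite author's own statement) =====
-- stated objective: alternative
-- what changed: B normalises every value by the minimum element and runs a one-pass layered DP maintaining the XOR sets of exactly 1-, 2- and 3-element subsets of the nonzero deltas (triple XORs are exactly a0 XOR these subset XORs, and XOR-ing the constant a0 is a bijection), instead of A's two staged all-pairs set products over the distinct values.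
import Mathlib
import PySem

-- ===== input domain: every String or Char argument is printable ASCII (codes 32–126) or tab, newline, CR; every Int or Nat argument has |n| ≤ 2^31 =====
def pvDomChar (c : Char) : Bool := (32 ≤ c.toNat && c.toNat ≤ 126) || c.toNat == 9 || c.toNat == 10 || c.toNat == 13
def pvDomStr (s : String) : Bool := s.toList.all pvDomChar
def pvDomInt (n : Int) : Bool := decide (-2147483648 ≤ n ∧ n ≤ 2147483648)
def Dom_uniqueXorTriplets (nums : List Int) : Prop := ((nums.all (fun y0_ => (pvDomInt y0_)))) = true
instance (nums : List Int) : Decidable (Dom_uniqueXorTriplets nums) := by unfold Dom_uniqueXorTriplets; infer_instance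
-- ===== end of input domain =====

-- B replaces A's staged pairwise/triple set products by a different algorithm: normalise by the
-- minimum value and run a one-pass layered DP over the XORs of 1-/2-/3-element subsets of the
-- nonzero deltas; same return value, proved equal below (objective: alternative).

-- ===== PORT A =====
def uniqueXorTriplets (nums : List Int) : Int :=
  let s : PySem.Set Int := PySem.Set.ofList nums
  let seen : PySem.Set Int :=
    s.foldl (fun seen a => s.foldl (fun seen b => seen.add (PySem.Int.bxor a b)) seen) PySem.Set.empty
  let ans : PySem.Set Int :=
    seen.foldl (fun ans v => s.foldl (fun ans w => ans.add (PySem.Int.bxor v w)) ans) PySem.Set.empty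
  PySem.Set.len ans

-- ===== PORT B =====
def uniqueXorTriplets_alt (nums : List Int) : Int :=
  let s : PySem.Set Int := PySem.Set.ofList nums
  if s = [] then 0
  else
    -- min(s): s is nonempty here, so min? is some; .getD 0 is never the default
    let a0 : Int := (PySem.List.min? s (fun x => x)).getD 0
    let deltas : List Int :=
      PySem.List.sorted (PySem.Set.diff (PySem.Set.ofList (s.map (fun x => PySem.Int.bxor x a0))) [0]) (fun x => x)
    let st : PySem.Set Int × PySem.Set Int × PySem.Set Int :=
      deltas.foldl (fun st x =>
        (PySem.Set.add st.1 x,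
         PySem.Set.union st.2.1 (PySem.Set.ofList (st.1.map (fun y => PySem.Int.bxor y x))),
         PySem.Set.union st.2.2 (PySem.Set.ofList (st.2.1.map (fun y => PySem.Int.bxor y x))))) 
        (PySem.Set.empty, PySem.Set.empty, PySem.Set.empty)
    PySem.Set.len (PySem.Set.union (PySem.Set.union (PySem.Set.union (PySem.Set.ofList [0]) st.1) st.2.1) st.2.2)

-- ===== PRECONDITION & SPEC =====
def Spec_uniqueXorTriplets (nums : List Int) (out : Int) : Prop := out = uniqueXorTriplets_alt nums
instance (nums : List Int) (out : Int) : Decidable (Spec_uniqueXorTriplets nums out) := by unfold Spec_uniqueXorTriplets; infer_instance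

-- ===== CLAIM (what is proved, stated in full; the proofs are below) =====
def Claim_equal_uniqueXorTriplets : Prop := ∀ (nums : List Int), Dom_uniqueXorTriplets nums → Spec_uniqueXorTriplets nums (uniqueXorTriplets nums)

-- ===== LEMMAS AND PROOFS =====

-- XOR algebra: bxor through a sign/magnitude encoding, giving associativity
def pvEnc (a : Int) : Bool × Nat := (decide (a < 0), if 0 ≤ a then a.toNat else (-a - 1).toNat)
def pvDec (p : Bool × Nat) : Int := if p.1 then -(p.2 : Int) - 1 else (p.2 : Int)
def pvComb (p q : Bool × Nat) : Bool × Nat := (xor p.1 q.1, p.2 ^^^ q.2)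

theorem pvEnc_dec (p : Bool × Nat) : pvEnc (pvDec p) = p := by
  unfold pvDec pvEnc
  rcases p with ⟨s, n⟩
  cases s <;> simp <;> omega

theorem bxor_eq_dec_comb (a b : Int) : PySem.Int.bxor a b = pvDec (pvComb (pvEnc a) (pvEnc b)) := by
  unfold PySem.Int.bxor pvDec pvComb pvEnc
  by_cases ha : 0 ≤ a <;> by_cases hb : 0 ≤ b <;>
    simp [ha, hb, not_le.1, show ¬ a < 0 ↔ 0 ≤ a from not_lt, show ¬ b < 0 ↔ 0 ≤ b from not_lt] <;> omega

theorem bxor_assoc (a b c : Int) :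
    PySem.Int.bxor (PySem.Int.bxor a b) c = PySem.Int.bxor a (PySem.Int.bxor b c) := by
  simp only [bxor_eq_dec_comb, pvEnc_dec]
  have : ∀ p q r, pvComb (pvComb p q) r = pvComb p (pvComb q r) := by
    intro p q r; unfold pvComb; simp [Bool.xor_assoc, Nat.xor_assoc]
  rw [this]

theorem zero_bxor (a : Int) : PySem.Int.bxor 0 a = a := by
  rw [PySem.Int.bxor_comm]; exact PySem.Int.bxor_zero a

theorem bxor_left_comm (a b c : Int) :
    PySem.Int.bxor a (PySem.Int.bxor b c) = PySem.Int.bxor b (PySem.Int.bxor a c) := by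
  rw [← bxor_assoc, PySem.Int.bxor_comm a b, bxor_assoc]

theorem bxor_cancel_left (a b : Int) : PySem.Int.bxor a (PySem.Int.bxor a b) = b := by
  rw [← bxor_assoc, PySem.Int.bxor_self, zero_bxor]

-- fold of XOR over a list
def xf (t : List Int) : Int := t.foldr PySem.Int.bxor 0

theorem xf_nil : xf [] = 0 := rfl
theorem xf_cons (x : Int) (t : List Int) : xf (x :: t) = PySem.Int.bxor x (xf t) := rfl

theorem xf_perm {t u : List Int} (h : t.Perm u) : xf t = xf u := by
  induction h with
  | nil => rfl
  | cons x _ ih => simp [xf_cons, ih]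
  | swap x y l => simp [xf_cons, bxor_left_comm]
  | trans _ _ ih1 ih2 => exact ih1.trans ih2

theorem xf_append_singleton (t : List Int) (x : Int) :
    xf (t ++ [x]) = PySem.Int.bxor (xf t) x := by
  induction t with
  | nil => simp [xf, PySem.Int.bxor_zero, zero_bxor]
  | cons h tl ih => simp [xf, List.foldr_append] at ih ⊢; rw [ih]; rw [← bxor_assoc]

-- "y is the XOR of a k-element sublist of p"
def SubX (p : List Int) (k : Nat) (y : Int) : Prop := ∃ t, t.Sublist p ∧ t.length = k ∧ y = xf t

-- membership in the set-building folds of port A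
theorem mem_fold_add {α : Type} (l : List α) (f : α → Int) (s : PySem.Set Int) (x : Int) :
    x ∈ l.foldl (fun acc a => acc.add (f a)) s ↔ x ∈ s ∨ ∃ a ∈ l, x = f a := by
  induction l generalizing s with
  | nil => simp
  | cons h t ih =>
    simp only [List.foldl_cons, ih, PySem.Set.mem_add, List.mem_cons]
    constructor
    · rintro ((hs | rfl) | ⟨a, ha, rfl⟩)
      · exact Or.inl hs
      · exact Or.inr ⟨h, Or.inl rfl, rfl⟩
      · exact Or.inr ⟨a, Or.inr ha, rfl⟩
    · rintro (hs | ⟨a, (rfl | ha), rfl⟩)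
      · exact Or.inl (Or.inl hs)
      · exact Or.inl (Or.inr rfl)
      · exact Or.inr ⟨a, ha, rfl⟩

theorem nodup_fold_add {α : Type} (l : List α) (f : α → Int) (s : PySem.Set Int)
    (hs : s.Nodup) : (l.foldl (fun acc a => acc.add (f a)) s).Nodup := by
  induction l generalizing s with
  | nil => exact hs
  | cons h t ih => exact ih _ (PySem.Set.nodup_add _ _ hs)

theorem mem_fold_add2 {α β : Type} (l1 : List α) (l2 : α → List β) (f : α → β → Int)
    (s : PySem.Set Int) (x : Int) :
    x ∈ l1.foldl (fun acc a => (l2 a).foldl (fun acc b => acc.add (f a b)) acc) s ↔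
      x ∈ s ∨ ∃ a ∈ l1, ∃ b ∈ l2 a, x = f a b := by
  induction l1 generalizing s with
  | nil => simp
  | cons h t ih =>
    simp only [List.foldl_cons, ih, mem_fold_add, List.mem_cons]
    constructor
    · rintro ((hs | ⟨b, hb, rfl⟩) | ⟨a, ha, b, hb, rfl⟩)
      · exact Or.inl hs
      · exact Or.inr ⟨h, Or.inl rfl, b, hb, rfl⟩
      · exact Or.inr ⟨a, Or.inr ha, b, hb, rfl⟩
    · rintro (hs | ⟨a, (rfl | ha), b, hb, rfl⟩)
      · exact Or.inl (Or.inl hs)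
      · exact Or.inl (Or.inr ⟨b, hb, rfl⟩)
      · exact Or.inr ⟨a, ha, b, hb, rfl⟩

theorem nodup_fold_add2 {α β : Type} (l1 : List α) (l2 : α → List β) (f : α → β → Int)
    (s : PySem.Set Int) (hs : s.Nodup) :
    (l1.foldl (fun acc a => (l2 a).foldl (fun acc b => acc.add (f a b)) acc) s).Nodup := by
  induction l1 generalizing s with
  | nil => exact hs
  | cons h t ih => exact ih _ (nodup_fold_add _ _ _ hs)

-- the layered DP of port B computes exactly the XORs of 1-/2-/3-element sublists
def pvStep (st : PySem.Set Int × PySem.Set Int × PySem.Set Int) (x : Int) :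
    PySem.Set Int × PySem.Set Int × PySem.Set Int :=
  (PySem.Set.add st.1 x,
   PySem.Set.union st.2.1 (PySem.Set.ofList (st.1.map (fun y => PySem.Int.bxor y x))),
   PySem.Set.union st.2.2 (PySem.Set.ofList (st.2.1.map (fun y => PySem.Int.bxor y x))))

theorem sublist_append_singleton_iff {t p : List Int} {x : Int} :
    t.Sublist (p ++ [x]) ↔ t.Sublist p ∨ ∃ t', t = t' ++ [x] ∧ t'.Sublist p := by
  rw [List.sublist_append_iff]
  constructor
  · rintro ⟨l1, l2, rfl, h1, h2⟩
    rcases List.sublist_singleton.1 h2 with rfl | rfl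
    · exact Or.inl (by simpa using h1)
    · exact Or.inr ⟨l1, rfl, h1⟩
  · rintro (h | ⟨t', rfl, h⟩)
    · exact ⟨t, [], by simp, h, by simp⟩
    · exact ⟨t', [x], rfl, h, by simp⟩

theorem dp_invariant (p : List Int) :
    let st := p.foldl pvStep (PySem.Set.empty, PySem.Set.empty, PySem.Set.empty)
    ((∀ y, y ∈ st.1 ↔ SubX p 1 y) ∧ (∀ y, y ∈ st.2.1 ↔ SubX p 2 y) ∧ (∀ y, y ∈ st.2.2 ↔ SubX p 3 y))
      ∧ st.1.Nodup ∧ st.2.1.Nodup ∧ st.2.2.Nodup := by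
  induction p using List.reverseRecOn with
  | nil =>
    refine ⟨⟨?_, ?_, ?_⟩, by simp [PySem.Set.empty], by simp [PySem.Set.empty], by simp [PySem.Set.empty]⟩ <;>
    · intro y
      simp only [List.foldl_nil, PySem.Set.empty, List.not_mem_nil]
      constructor
      · intro h; cases h
      · rintro ⟨t, ht, hl, rfl⟩
        have := List.sublist_nil.1 ht
        subst this
        simp at hl
  | append_singleton p x ih =>
    obtain ⟨⟨h1, h2, h3⟩, n1, n2, n3⟩ := ih
    rw [List.foldl_append]
    set st := p.foldl pvStep (PySem.Set.empty, PySem.Set.empty, PySem.Set.empty) with hst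
    refine ⟨⟨?_, ?_, ?_⟩, ?_, ?_, ?_⟩
    · intro y
      show y ∈ PySem.Set.add st.1 x ↔ _
      rw [PySem.Set.mem_add]
      constructor
      · rintro (h | rfl)
        · obtain ⟨t, ht, hl, rfl⟩ := (h1 y).1 h
          exact ⟨t, ht.trans (List.sublist_append_left _ _), hl, rfl⟩
        · exact ⟨[y], by simp, rfl, by simp [xf_cons, xf_nil, PySem.Int.bxor_zero]⟩
      · rintro ⟨t, ht, hl, rfl⟩
        rcases sublist_append_singleton_iff.1 ht with h | ⟨t', rfl, h⟩
        · exact Or.inl ((h1 _).2 ⟨t, h, hl, rfl⟩)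
        · rcases t' with _ | ⟨z, t''⟩
          · right; simp [xf_cons, xf_nil, PySem.Int.bxor_zero]
          · simp at hl
    · intro y
      show y ∈ PySem.Set.union st.2.1 (PySem.Set.ofList (st.1.map (fun z => PySem.Int.bxor z x))) ↔ _
      rw [PySem.Set.mem_union, PySem.Set.mem_ofList, List.mem_map]
      constructor
      · rintro (h | ⟨z, hz, rfl⟩)
        · obtain ⟨t, ht, hl, rfl⟩ := (h2 y).1 h
          exact ⟨t, ht.trans (List.sublist_append_left _ _), hl, rfl⟩
        · obtain ⟨t, ht, hl, rfl⟩ := (h1 z).1 hz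
          exact ⟨t ++ [x], ht.append (List.Sublist.refl _), by simp [hl], (xf_append_singleton t x).symm⟩
      · rintro ⟨t, ht, hl, rfl⟩
        rcases sublist_append_singleton_iff.1 ht with h | ⟨t', rfl, h⟩
        · exact Or.inl ((h2 _).2 ⟨t, h, hl, rfl⟩)
        · right
          refine ⟨xf t', (h1 _).2 ⟨t', h, by simpa using hl, rfl⟩, (xf_append_singleton t' x).symm⟩
    · intro y
      show y ∈ PySem.Set.union st.2.2 (PySem.Set.ofList (st.2.1.map (fun z => PySem.Int.bxor z x))) ↔ _
      rw [PySem.Set.mem_union, PySem.Set.mem_ofList, List.mem_map]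
      constructor
      · rintro (h | ⟨z, hz, rfl⟩)
        · obtain ⟨t, ht, hl, rfl⟩ := (h3 y).1 h
          exact ⟨t, ht.trans (List.sublist_append_left _ _), hl, rfl⟩
        · obtain ⟨t, ht, hl, rfl⟩ := (h2 z).1 hz
          exact ⟨t ++ [x], ht.append (List.Sublist.refl _), by simp [hl], (xf_append_singleton t x).symm⟩
      · rintro ⟨t, ht, hl, rfl⟩
        rcases sublist_append_singleton_iff.1 ht with h | ⟨t', rfl, h⟩
        · exact Or.inl ((h3 _).2 ⟨t, h, hl, rfl⟩)
        · right
          refine ⟨xf t', (h2 _).2 ⟨t', h, by simpa using hl, rfl⟩, (xf_append_singleton t' x).symm⟩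
    · exact PySem.Set.nodup_add _ _ n1
    · exact PySem.Set.nodup_union _ _ n2
    · exact PySem.Set.nodup_union _ _ n3

-- characterisation of port A's answer set
theorem memA (s : PySem.Set Int) (y : Int) :
    y ∈ (((s.foldl (fun seen a => s.foldl (fun seen b => seen.add (PySem.Int.bxor a b)) seen) PySem.Set.empty)).foldl
          (fun ans v => s.foldl (fun ans w => ans.add (PySem.Int.bxor v w)) ans) PySem.Set.empty) ↔
      ∃ a ∈ s, ∃ b ∈ s, ∃ c ∈ s, y = PySem.Int.bxor (PySem.Int.bxor a b) c := by
  rw [mem_fold_add2]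
  simp only [PySem.Set.empty, List.not_mem_nil, false_or]
  constructor
  · rintro ⟨v, hv, w, hw, rfl⟩
    rw [mem_fold_add2] at hv
    rcases hv with h | ⟨a, ha, b, hb, rfl⟩
    · simp [PySem.Set.empty] at h
    · exact ⟨a, ha, b, hb, w, hw, rfl⟩
  · rintro ⟨a, ha, b, hb, c, hc, rfl⟩
    refine ⟨PySem.Int.bxor a b, ?_, c, hc, rfl⟩
    rw [mem_fold_add2]
    exact Or.inr ⟨a, ha, b, hb, rfl⟩

-- realise a small nodup subset as a sublist with the same XOR
theorem subset_to_sublist {d u : List Int} (hd : d.Nodup) (hu : u.Nodup) (hsub : ∀ z ∈ u, z ∈ d) :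
    ∃ t, t.Sublist d ∧ t.length = u.length ∧ xf t = xf u := by
  obtain ⟨t, htu, htd⟩ := (List.Nodup.subperm hu (fun z hz => hsub z hz))
  exact ⟨t, htd, htu.length_eq, xf_perm htu⟩

-- the key bridge: triple XORs over s = a0 ^ (XOR of a ≤3-element sublist of the deltas)
theorem bridge (s : PySem.Set Int) (a0 : Int) (ha0 : a0 ∈ s) (d : List Int)
    (hd : d.Nodup) (hdm : ∀ z, z ∈ d ↔ (∃ x ∈ s, z = PySem.Int.bxor x a0) ∧ z ≠ 0) (y : Int) :
    (∃ a ∈ s, ∃ b ∈ s, ∃ c ∈ s, y = PySem.Int.bxor (PySem.Int.bxor a b) c) ↔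
      ∃ t, t.Sublist d ∧ t.length ≤ 3 ∧ y = PySem.Int.bxor a0 (xf t) := by
  have hmemx : ∀ z ∈ d, PySem.Int.bxor z a0 ∈ s := by
    intro z hz
    obtain ⟨⟨x, hx, rfl⟩, -⟩ := (hdm z).1 hz
    simpa [bxor_assoc, PySem.Int.bxor_self, PySem.Int.bxor_zero] using hx
  have hdelta : ∀ x ∈ s, PySem.Int.bxor x a0 = 0 ∨ PySem.Int.bxor x a0 ∈ d := by
    intro x hx
    by_cases h : PySem.Int.bxor x a0 = 0
    · exact Or.inl h
    · exact Or.inr ((hdm _).2 ⟨⟨x, hx, rfl⟩, h⟩)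
  constructor
  · rintro ⟨a, ha, b, hb, c, hc, rfl⟩
    have hy : PySem.Int.bxor (PySem.Int.bxor a b) c =
        PySem.Int.bxor a0 (PySem.Int.bxor (PySem.Int.bxor (PySem.Int.bxor a a0) (PySem.Int.bxor b a0)) (PySem.Int.bxor c a0)) := by
      simp [bxor_assoc, PySem.Int.bxor_comm, bxor_left_comm, bxor_cancel_left,
        PySem.Int.bxor_self, PySem.Int.bxor_zero, zero_bxor]
    have h1 := hdelta a ha
    have h2 := hdelta b hb
    have h3 := hdelta c hc
    set da := PySem.Int.bxor a a0 with hda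
    set db := PySem.Int.bxor b a0 with hdb
    set dc := PySem.Int.bxor c a0 with hdc
    suffices h : ∃ u : List Int, u.Nodup ∧ (∀ z ∈ u, z ∈ d) ∧ u.length ≤ 3 ∧
        xf u = PySem.Int.bxor (PySem.Int.bxor da db) dc by
      obtain ⟨u, hnd, hsubu, hlenu, hxfu⟩ := h
      obtain ⟨t, htd, htl, htx⟩ := subset_to_sublist hd hnd hsubu
      refine ⟨t, htd, by omega, ?_⟩
      rw [hy, ← hxfu, ← htx]
    by_cases h12 : da = db
    · have hE : PySem.Int.bxor (PySem.Int.bxor da db) dc = dc := by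
        rw [← h12, PySem.Int.bxor_self, zero_bxor]
      rcases h3 with h0 | hd3
      · exact ⟨[], by simp, by simp, by simp, by rw [hE, h0]; rfl⟩
      · exact ⟨[dc], by simp, by simpa using hd3, by simp, by
          rw [hE]; simp [xf_cons, xf_nil, PySem.Int.bxor_zero]⟩
    · by_cases h13 : da = dc
      · have hE : PySem.Int.bxor (PySem.Int.bxor da db) dc = db := by
          rw [← h13]
          simp [bxor_assoc, PySem.Int.bxor_comm, bxor_left_comm, bxor_cancel_left,
            PySem.Int.bxor_self, PySem.Int.bxor_zero, zero_bxor]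
        rcases h2 with h0 | hd2
        · exact ⟨[], by simp, by simp, by simp, by rw [hE, h0]; rfl⟩
        · exact ⟨[db], by simp, by simpa using hd2, by simp, by
            rw [hE]; simp [xf_cons, xf_nil, PySem.Int.bxor_zero]⟩
      · by_cases h23 : db = dc
        · have hE : PySem.Int.bxor (PySem.Int.bxor da db) dc = da := by
            rw [h23]
            simp [bxor_assoc, PySem.Int.bxor_comm, bxor_left_comm, bxor_cancel_left,
              PySem.Int.bxor_self, PySem.Int.bxor_zero, zero_bxor]
          rcases h1 with h0 | hd1
          · exact ⟨[], by simp, by simp, by simp, by rw [hE, h0]; rfl⟩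
          · exact ⟨[da], by simp, by simpa using hd1, by simp, by
              rw [hE]; simp [xf_cons, xf_nil, PySem.Int.bxor_zero]⟩
        · rcases h1 with hza | had
          · have hbd : db ∈ d := by
              rcases h2 with h0 | h
              · exact absurd (hza.trans h0.symm) h12
              · exact h
            have hcd : dc ∈ d := by
              rcases h3 with h0 | h
              · exact absurd (hza.trans h0.symm) h13
              · exact h
            refine ⟨[db, dc], by simp [h23], by simp [hbd, hcd], by simp, ?_⟩
            simp [hza, xf_cons, xf_nil, PySem.Int.bxor_zero, zero_bxor]
          · rcases h2 with hzb | hbd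
            · have hcd : dc ∈ d := by
                rcases h3 with h0 | h
                · exact absurd (hzb.trans h0.symm) h23
                · exact h
              refine ⟨[da, dc], by simp [h13], by simp [had, hcd], by simp, ?_⟩
              simp [hzb, xf_cons, xf_nil, PySem.Int.bxor_zero, zero_bxor]
            · rcases h3 with hzc | hcd
              · refine ⟨[da, db], by simp [h12], by simp [had, hbd], by simp, ?_⟩
                simp [hzc, xf_cons, xf_nil, PySem.Int.bxor_zero, zero_bxor]
              · refine ⟨[da, db, dc], by simp [h12, h13, h23], by simp [had, hbd, hcd], by simp, ?_⟩
                simp [xf_cons, xf_nil, PySem.Int.bxor_zero, bxor_assoc]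
  · rintro ⟨t, htd, hlen, rfl⟩
    have hsub := htd.subset
    rcases t with _ | ⟨z, t⟩
    · exact ⟨a0, ha0, a0, ha0, a0, ha0, by
        simp [xf_nil, PySem.Int.bxor_self, zero_bxor, PySem.Int.bxor_zero]⟩
    · have hz : PySem.Int.bxor z a0 ∈ s := hmemx z (hsub (by simp))
      rcases t with _ | ⟨w, t⟩
      · refine ⟨PySem.Int.bxor z a0, hz, a0, ha0, a0, ha0, ?_⟩
        simp [xf_cons, xf_nil, bxor_assoc, PySem.Int.bxor_comm, bxor_left_comm,
          bxor_cancel_left, PySem.Int.bxor_self, PySem.Int.bxor_zero, zero_bxor]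
      · have hw : PySem.Int.bxor w a0 ∈ s := hmemx w (hsub (by simp))
        rcases t with _ | ⟨u, t⟩
        · refine ⟨PySem.Int.bxor z a0, hz, PySem.Int.bxor w a0, hw, a0, ha0, ?_⟩
          simp [xf_cons, xf_nil, bxor_assoc, PySem.Int.bxor_comm, bxor_left_comm,
            bxor_cancel_left, PySem.Int.bxor_self, PySem.Int.bxor_zero, zero_bxor]
        · have hu : PySem.Int.bxor u a0 ∈ s := hmemx u (hsub (by simp))
          rcases t with _ | ⟨v, t⟩
          · refine ⟨PySem.Int.bxor z a0, hz, PySem.Int.bxor w a0, hw, PySem.Int.bxor u a0, hu, ?_⟩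
            simp [xf_cons, xf_nil, bxor_assoc, PySem.Int.bxor_comm, bxor_left_comm,
              bxor_cancel_left, PySem.Int.bxor_self, PySem.Int.bxor_zero, zero_bxor]
          · simp at hlen; omega

-- ===== VERDICT (by name: the statement is the Claim_ definition above) =====
theorem uniqueXorTriplets_spec : Claim_equal_uniqueXorTriplets := by
  intro nums _
  unfold Spec_uniqueXorTriplets uniqueXorTriplets uniqueXorTriplets_alt
  simp only []
  set s : PySem.Set Int := PySem.Set.ofList nums with hs
  by_cases hnil : s = []
  · rw [if_pos hnil]
    rw [hnil]
    simp [PySem.Set.len, PySem.Set.empty]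
  · rw [if_neg hnil]
    obtain ⟨m, hm⟩ : ∃ m, PySem.List.min? s (fun x => x) = some m := by
      cases h : PySem.List.min? s (fun x => x) with
      | none => exact absurd ((PySem.List.min?_eq_none_iff s (fun x => x)).1 h) hnil
      | some m => exact ⟨m, rfl⟩
    set a0 : Int := (PySem.List.min? s (fun x => x)).getD 0 with ha0def
    have ha0m : a0 = m := by rw [ha0def, hm]; rfl
    have ha0 : a0 ∈ s := by rw [ha0m]; exact PySem.List.min?_mem hm
    set d : List Int :=
      PySem.List.sorted (PySem.Set.diff (PySem.Set.ofList (s.map (fun x => PySem.Int.bxor x a0))) [0]) (fun x => x) with hdd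
    have hd_nodup : d.Nodup := by
      have hp := PySem.List.sorted_perm (PySem.Set.diff (PySem.Set.ofList (s.map (fun x => PySem.Int.bxor x a0))) [0]) (fun x => x) false
      exact hp.nodup_iff.2 (PySem.Set.nodup_diff _ _ (PySem.Set.nodup_ofList _))
    have hdm : ∀ z, z ∈ d ↔ (∃ x ∈ s, z = PySem.Int.bxor x a0) ∧ z ≠ 0 := by
      intro z
      rw [hdd, PySem.List.mem_sorted, PySem.Set.mem_diff, PySem.Set.mem_ofList, List.mem_map]
      constructor
      · rintro ⟨⟨x, hx, rfl⟩, h0⟩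
        exact ⟨⟨x, hx, rfl⟩, by simpa using h0⟩
      · rintro ⟨⟨x, hx, rfl⟩, h0⟩
        exact ⟨⟨x, hx, rfl⟩, by simpa using h0⟩
    obtain ⟨⟨h1, h2, h3⟩, n1, n2, n3⟩ := dp_invariant d
    set st := d.foldl pvStep (PySem.Set.empty, PySem.Set.empty, PySem.Set.empty) with hstd
    set EB : PySem.Set Int :=
      PySem.Set.union (PySem.Set.union (PySem.Set.union (PySem.Set.ofList [0]) st.1) st.2.1) st.2.2 with hEB
    have hEB_mem : ∀ e, e ∈ EB ↔ ∃ t, t.Sublist d ∧ t.length ≤ 3 ∧ e = xf t := by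
      intro e
      rw [hEB, PySem.Set.mem_union, PySem.Set.mem_union, PySem.Set.mem_union, PySem.Set.mem_ofList]
      constructor
      · rintro (((h | h) | h) | h)
        · simp only [List.mem_singleton] at h
          exact ⟨[], by simp, by simp, by simpa using h⟩
        · obtain ⟨t, ht, hl, rfl⟩ := (h1 e).1 h
          exact ⟨t, ht, by omega, rfl⟩
        · obtain ⟨t, ht, hl, rfl⟩ := (h2 e).1 h
          exact ⟨t, ht, by omega, rfl⟩
        · obtain ⟨t, ht, hl, rfl⟩ := (h3 e).1 h
          exact ⟨t, ht, by omega, rfl⟩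
      · rintro ⟨t, ht, hl, rfl⟩
        rcases t with _ | ⟨z, t⟩
        · exact Or.inl (Or.inl (Or.inl (by simp [xf_nil])))
        · rcases t with _ | ⟨w, t⟩
          · exact Or.inl (Or.inl (Or.inr ((h1 _).2 ⟨[z], ht, rfl, rfl⟩)))
          · rcases t with _ | ⟨u, t⟩
            · exact Or.inl (Or.inr ((h2 _).2 ⟨[z, w], ht, rfl, rfl⟩))
            · rcases t with _ | ⟨v, t⟩
              · exact Or.inr ((h3 _).2 ⟨[z, w, u], ht, rfl, rfl⟩)
              · simp at hl; omega
    have hEB_nodup : EB.Nodup := by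
      rw [hEB]
      exact PySem.Set.nodup_union _ _ (PySem.Set.nodup_union _ _ (PySem.Set.nodup_union _ _ (PySem.Set.nodup_ofList _)))
    have hinj : Function.Injective (fun e => PySem.Int.bxor a0 e) := by
      intro x y h
      have hx := bxor_cancel_left a0 x
      have hy' := bxor_cancel_left a0 y
      simp only at h
      rw [← hx, ← hy', h]
    have hA_nodup :
        ((s.foldl (fun seen a => s.foldl (fun seen b => seen.add (PySem.Int.bxor a b)) seen) PySem.Set.empty).foldl
          (fun ans v => s.foldl (fun ans w => ans.add (PySem.Int.bxor v w)) ans) PySem.Set.empty).Nodup :=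
      nodup_fold_add2 _ _ _ _ List.nodup_nil
    have hperm :
        ((s.foldl (fun seen a => s.foldl (fun seen b => seen.add (PySem.Int.bxor a b)) seen) PySem.Set.empty).foldl
          (fun ans v => s.foldl (fun ans w => ans.add (PySem.Int.bxor v w)) ans) PySem.Set.empty).Perm
        (EB.map (fun e => PySem.Int.bxor a0 e)) := by
      refine (List.perm_ext_iff_of_nodup hA_nodup (hEB_nodup.map hinj)).2 ?_
      intro y
      rw [memA s y, List.mem_map, bridge s a0 ha0 d hd_nodup hdm y]
      constructor
      · rintro ⟨t, ht, hl, rfl⟩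
        exact ⟨xf t, (hEB_mem _).2 ⟨t, ht, hl, rfl⟩, rfl⟩
      · rintro ⟨e, he, rfl⟩
        obtain ⟨t, ht, hl, rfl⟩ := (hEB_mem e).1 he
        exact ⟨t, ht, hl, rfl⟩
    simp only [PySem.Set.len]
    have hlen := hperm.length_eq
    rw [List.length_map] at hlen
    exact_mod_cast hlen
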